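-- pv_equiv track=rewrite | github.com/chillymosh/AdventOfCode | 2025/Day 6/python/main.py | part2
-- ===== SOURCE A (Python) =====
-- from math import prod
--
-- def calculate(nums: list[int], op: str) -> int:
--     return sum(nums) if op == "+" else prod(nums)
--
-- def part2(blocks: list[list[tuple[str, ...]]]) -> int:
--     total = 0
--     for block in blocks:
--         rows = list(zip(*block))
--         op = "+" if "+" in rows[-1] else "*"
--         nums = [
--             int("".join(d for d in col if d != " "))
--             for col in reversed(list(zip(*rows[:-1])))
--             if any(d != " " for d in col)
--         ]
--         total += calculate(nums, op)
--     return total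
-- ===== SOURCE B (Python) =====
-- def part2(blocks):
--     # Column-major sweep: grow one (cells, seen-non-space) buffer per row in a
--     # single left-to-right pass over the columns, then fold the sum/product
--     # directly with an accumulator -- no transposition, no number list.
--     total = 0
--     for block in blocks:
--         n = len(block)
--         m = min(len(row) for row in block)
--         bufs = [([], False)] * n
--         for j in range(m - 1):
--             bufs = [(b + [row[j]], True) if row[j] != " " else (b, u)
--                     for row, (b, u) in zip(block, bufs)]
--         if any(row[m - 1] == "+" for row in block):
--             acc = 0
--             for b, u in bufs:
--                 if u:
--                     acc += int("".join(b))
--         else: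
--             acc = 1
--             for b, u in bufs:
--                 if u:
--                     acc *= int("".join(b))
--         total += acc
--     return total
-- ===== Notes on version B (the rewrite author's own statement) =====
-- stated objective: alternative
-- what changed: B replaces A's double zip-transposition and number-list construction by a single column-major sweep that grows one (string, seen-non-space) buffer per row and then folds the sum/product directly with an accumulator.
import Mathlib
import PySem

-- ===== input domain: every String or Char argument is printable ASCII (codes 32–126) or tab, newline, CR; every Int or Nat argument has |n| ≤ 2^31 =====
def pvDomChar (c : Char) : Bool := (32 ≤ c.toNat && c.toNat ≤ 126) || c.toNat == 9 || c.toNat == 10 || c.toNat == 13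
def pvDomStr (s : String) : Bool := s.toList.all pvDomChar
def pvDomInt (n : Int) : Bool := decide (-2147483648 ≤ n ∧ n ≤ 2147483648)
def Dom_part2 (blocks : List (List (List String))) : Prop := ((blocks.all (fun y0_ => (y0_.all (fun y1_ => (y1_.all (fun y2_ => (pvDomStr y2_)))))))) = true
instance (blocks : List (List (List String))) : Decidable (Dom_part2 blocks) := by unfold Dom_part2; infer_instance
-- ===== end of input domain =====

-- B replaces A's double transposition + number list by a single column-major sweep over
-- per-row buffers and a fused sum/product accumulator (alternative decomposition, same cost).

-- ===== PORT A =====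
-- Python zip(*ls): rows of length = min of the lists' lengths (0 lists -> []); exact since
-- every index j < min length is in range for every list (the getD default is never used there).
def pyZip (ls : List (List String)) : List (List String) :=
  (List.range ((ls.map List.length).min?.getD 0)).map (fun j => ls.map (fun r => r.getD j ""))

-- calculate(nums, op): sum(nums) if op == "+" else prod(nums)
def calcA (nums : List Int) (op : String) : Int :=
  if op == "+" then nums.foldl (· + ·) 0 else nums.foldl (· * ·) 1

def part2 (blocks : List (List (List String))) : Int :=
  blocks.foldl (fun total block =>
    let rows := pyZip block
    -- rows[-1]: IndexError when rows = [] (excluded by Pre_); getD totalizes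
    let op := if ((PySem.List.pyGet? rows (-1)).getD []).contains "+" then "+" else "*"
    let nums := ((pyZip rows.dropLast).reverse).filterMap (fun col =>
      if col.any (fun d => d ≠ " ") then
        -- int(...) : ValueError when none (excluded by Pre_); getD totalizes
        some ((PySem.Int.ofStr? (PySem.Str.join "" (col.filter (fun d => d ≠ " ")))).getD 0)
      else none)
    total + calcA nums op) 0

-- ===== PORT B =====
def part2_alt (blocks : List (List (List String))) : Int :=
  blocks.foldl (fun total block =>
    let n := block.length
    -- min(len(row) for row in block): ValueError when block = [] (excluded by Pre_); getD totalizes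
    let m := (block.map List.length).min?.getD 0
    let bufs := (List.range (m - 1)).foldl (fun bufs j =>
        (block.zip bufs).map (fun rb =>
          if rb.1.getD j "" ≠ " " then (rb.2.1 ++ [rb.1.getD j ""], true) else rb.2))
      (List.replicate n ([], false))
    total +
      (if block.any (fun row => row.getD (m - 1) "" == "+") then
        bufs.foldl (fun acc su =>
          if su.2 then acc + (PySem.Int.ofStr? (PySem.Str.join "" su.1)).getD 0 else acc) 0
      else
        bufs.foldl (fun acc su =>
          if su.2 then acc * (PySem.Int.ofStr? (PySem.Str.join "" su.1)).getD 0 else acc) 1)) 0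

-- ===== PRECONDITION & SPEC =====
-- Pre_ = exactly the inputs where Python A returns: every block and row non-empty (else
-- rows[-1] IndexError) and every truncated row with a non-space cell joins to an int-parsable
-- string (else int(...) ValueError).
def Pre_part2 (blocks : List (List (List String))) : Prop :=
  ∀ block ∈ blocks, block ≠ [] ∧ (∀ row ∈ block, row ≠ []) ∧
    (∀ row ∈ block,
      ((row.take (((block.map List.length).min?.getD 0) - 1)).any (fun d => d ≠ " ")) = true →
      (PySem.Int.ofStr? (PySem.Str.join ""
        ((row.take (((block.map List.length).min?.getD 0) - 1)).filter (fun d => d ≠ " ")))).isSome = true)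
instance (blocks : List (List (List String))) : Decidable (Pre_part2 blocks) := by
  unfold Pre_part2; infer_instance

def pvWitness_part2 : List (List (List String)) := [[["1", "+"], ["2", "+"]]]

def Spec_part2 (blocks : List (List (List String))) (out : Int) : Prop := out = part2_alt blocks
instance (blocks : List (List (List String))) (out : Int) : Decidable (Spec_part2 blocks out) := by unfold Spec_part2; infer_instance

-- ===== CLAIM (what is proved, stated in full; the proofs are below) =====
def Claim_equal_part2 : Prop := ∀ (blocks : List (List (List String))), Dom_part2 blocks → Pre_part2 blocks → Spec_part2 blocks (part2 blocks)

-- ===== LEMMAS AND PROOFS =====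

-- the common per-block number list: one number per row whose truncated prefix has a non-space cell
def numsOf (block : List (List String)) (k : Nat) : List Int :=
  block.filterMap (fun row =>
    if (row.take k).any (fun d => d ≠ " ") then
      some ((PySem.Int.ofStr? (PySem.Str.join "" ((row.take k).filter (fun d => d ≠ " ")))).getD 0)
    else none)

theorem pv_foldl_add_eq (l : List Int) (a : Int) : l.foldl (· + ·) a = a + l.sum := by
  induction l generalizing a with
  | nil => simp
  | cons x t ih => simp [ih, add_assoc]

theorem pv_foldl_mul_eq (l : List Int) (a : Int) : l.foldl (· * ·) a = a * l.prod := by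
  induction l generalizing a with
  | nil => simp
  | cons x t ih => simp [ih, mul_assoc]

-- calcA ignores reversal: sum and product are permutation-invariant
theorem pv_calcA_reverse (l : List Int) (op : String) : calcA l.reverse op = calcA l op := by
  unfold calcA
  rw [pv_foldl_add_eq, pv_foldl_add_eq, pv_foldl_mul_eq, pv_foldl_mul_eq,
      List.sum_reverse, List.prod_reverse]

-- folding op over the kept values = filtering first, then folding op
theorem pv_foldl_op_filterMap {α : Type} (op : Int → Int → Int) (p : α → Bool) (v : α → Int)
    (l : List α) (a : Int) :
    l.foldl (fun acc x => if p x then op acc (v x) else acc) a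
      = (l.filterMap (fun x => if p x then some (v x) else none)).foldl op a := by
  induction l generalizing a with
  | nil => simp
  | cons x t ih => by_cases h : p x <;> simp [h, ih]

-- the column-major buffer sweep of B computes, per row, the filtered prefix and the seen flag
theorem pv_bufs_inv (block : List (List String)) (k : Nat)
    (hlen : ∀ row ∈ block, k ≤ row.length) :
    (List.range k).foldl (fun bufs j =>
        (block.zip bufs).map (fun rb =>
          if rb.1.getD j "" ≠ " " then (rb.2.1 ++ [rb.1.getD j ""], true) else rb.2))
      (List.replicate block.length (([] : List String), false))
    = block.map (fun row =>
        ((row.take k).filter (fun c => c ≠ " "), (row.take k).any (fun c => c ≠ " "))) := by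
  induction k with
  | zero => simp [← List.map_const']
  | succ k ih =>
    have hk : ∀ row ∈ block, k ≤ row.length := fun r hr => Nat.le_of_succ_le (hlen r hr)
    rw [List.range_succ, List.foldl_append, ih hk, List.foldl_cons, List.foldl_nil]
    have hz := List.zip_map' (f := (id : List String → List String))
      (g := fun row => ((row.take k).filter (fun c => decide (c ≠ " ")),
                   (row.take k).any (fun c => decide (c ≠ " ")))) (l := block)
    simp only [List.map_id] at hz
    rw [hz, List.map_map]
    apply List.map_congr_left
    intro row hrow
    have hlt : k < row.length := hlen row hrow
    have htake : row.take (k + 1) = row.take k ++ [row[k]] := by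
      rw [List.take_add_one, List.getElem?_eq_getElem hlt]; rfl
    simp only [Function.comp_def, htake, List.filter_append, List.any_append]
    by_cases hc : row[k] = " " <;>
      simp [hc, List.getD_eq_getElem?_getD, List.getElem?_eq_getElem hlt]

-- B's per-block value = calcA (numsOf block (m-1)) op
theorem pv_B_block (block : List (List String)) (m : Nat)
    (_hm : m = (block.map List.length).min?.getD 0)
    (hlen : ∀ row ∈ block, m ≤ row.length) :
    (let bufs := (List.range (m - 1)).foldl (fun bufs j =>
        (block.zip bufs).map (fun rb =>
          if rb.1.getD j "" ≠ " " then (rb.2.1 ++ [rb.1.getD j ""], true) else rb.2))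
      (List.replicate block.length (([] : List String), false))
     if block.any (fun row => row.getD (m - 1) "" == "+") then
        bufs.foldl (fun acc su =>
          if su.2 then acc + (PySem.Int.ofStr? (PySem.Str.join "" su.1)).getD 0 else acc) 0
      else
        bufs.foldl (fun acc su =>
          if su.2 then acc * (PySem.Int.ofStr? (PySem.Str.join "" su.1)).getD 0 else acc) 1)
    = calcA (numsOf block (m - 1))
        (if block.any (fun row => row.getD (m - 1) "" == "+") then "+" else "*") := by
  have hlen' : ∀ row ∈ block, m - 1 ≤ row.length := fun r hr => le_trans (Nat.sub_le m 1) (hlen r hr)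
  simp only [pv_bufs_inv block (m - 1) hlen']
  rw [pv_foldl_op_filterMap (· + ·) (fun su : List String × Bool => su.2)
        (fun su => (PySem.Int.ofStr? (PySem.Str.join "" su.1)).getD 0),
      pv_foldl_op_filterMap (· * ·) (fun su : List String × Bool => su.2)
        (fun su => (PySem.Int.ofStr? (PySem.Str.join "" su.1)).getD 0),
      List.filterMap_map]
  by_cases hop : block.any (fun row => row.getD (m - 1) "" == "+") <;>
    simp [calcA, numsOf]

-- A's per-block value = the same calcA (numsOf block (m-1)) op
theorem pv_A_block (block : List (List String))
    (h1 : block ≠ []) (h2 : ∀ row ∈ block, row ≠ []) :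
    (let rows := pyZip block
     let op := if ((PySem.List.pyGet? rows (-1)).getD []).contains "+" then "+" else "*"
     let nums := ((pyZip rows.dropLast).reverse).filterMap (fun col =>
       if col.any (fun d => d ≠ " ") then
         some ((PySem.Int.ofStr? (PySem.Str.join "" (col.filter (fun d => d ≠ " ")))).getD 0)
       else none)
     calcA nums op)
    = calcA (numsOf block (((block.map List.length).min?.getD 0) - 1))
        (if block.any (fun row =>
            row.getD (((block.map List.length).min?.getD 0) - 1) "" == "+") then "+" else "*") := by
  simp only []
  have hne : block.map List.length ≠ [] := by simpa using h1
  obtain ⟨a, ha⟩ : ∃ a, (block.map List.length).min? = some a := by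
    cases h : (block.map List.length).min? with
    | none => exact absurd (List.min?_eq_none_iff.mp h) hne
    | some a => exact ⟨a, rfl⟩
  set m := (block.map List.length).min?.getD 0 with hmdef
  set rows := pyZip block with hrowsdef
  have hma : m = a := by rw [hmdef, ha]; rfl
  obtain ⟨hmem, hle⟩ := List.min?_eq_some_iff.mp ha
  have hmlen : ∀ r ∈ block, m ≤ r.length := by
    intro r hr; rw [hma]; exact hle _ (List.mem_map_of_mem hr)
  have hm1 : 1 ≤ m := by
    rw [hma]
    obtain ⟨r, hr, hrl⟩ := List.mem_map.mp hmem
    have := h2 r hr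
    rcases r with _ | _
    · simp_all
    · simp at hrl; omega
  have hz : rows = (List.range m).map (fun j => block.map (fun r => r.getD j "")) := by
    rw [hrowsdef, pyZip, hmdef]
  -- operator equality
  have hop : ((PySem.List.pyGet? rows (-1)).getD []).contains "+"
      = block.any (fun row => row.getD (m - 1) "" == "+") := by
    obtain ⟨k, hk⟩ : ∃ k, m = k + 1 := ⟨m - 1, by omega⟩
    have hlast : PySem.List.pyGet? rows (-1)
        = some (block.map (fun r => r.getD (m - 1) "")) := by
      rw [PySem.List.pyGet?_neg_one, hz, hk, List.range_succ, List.map_append]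
      simp
    rw [hlast]
    rw [Bool.eq_iff_iff]
    simp
  -- the number list is numsOf reversed
  have hnums : ((pyZip rows.dropLast).reverse).filterMap (fun col =>
       if (col.any fun d => decide (d ≠ " ")) = true then
         some ((PySem.Int.ofStr? (PySem.Str.join "" (List.filter (fun d => decide (d ≠ " ")) col))).getD 0)
       else none)
      = (numsOf block (m - 1)).reverse := by
    rcases Nat.lt_or_ge m 2 with hmlt | hmge
    · -- m = 1: both sides empty
      have hm' : m = 1 := by omega
      have hdrop : rows.dropLast = [] := by
        rw [hz, hm']; simp [List.range_succ]
      rw [hdrop, hm']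
      simp [pyZip, numsOf]
    · obtain ⟨k, hk⟩ : ∃ k, m = k + 1 := ⟨m - 1, by omega⟩
      have hk1 : 1 ≤ k := by omega
      have hdrop : rows.dropLast = (List.range k).map (fun j => block.map (fun r => r.getD j "")) := by
        rw [hz, hk, List.range_succ, List.map_append]
        simp
      have hcols : pyZip rows.dropLast = block.map (fun r => r.take k) := by
        rw [hdrop]
        have hlens : (((List.range k).map (fun j => block.map (fun r => r.getD j ""))).map List.length)
            = List.replicate k block.length := by
          rw [List.map_map]
          simp [Function.comp_def, List.map_const']
        have hmin : (((List.range k).map (fun j => block.map (fun r => r.getD j ""))).map List.length).min?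
            = some block.length := by
          rw [hlens, List.min?_eq_some_iff]
          constructor
          · exact List.mem_replicate.mpr ⟨by omega, rfl⟩
          · intro b hb; rw [(List.mem_replicate.mp hb).2]
        rw [pyZip, hmin]
        apply List.ext_getElem
        · simp
        · intro i hi hi'
          simp only [List.getElem_map, List.getElem_range, List.map_map]
          have hib : i < block.length := by simpa using hi
          have hlen_i : m ≤ block[i].length := hmlen _ (List.getElem_mem hib)
          apply List.ext_getElem
          · simp; omega
          · intro j hj hj'
            simp only [List.getElem_map, List.getElem_range, Function.comp_def, List.getElem_take]
            have hj2 : j < k := by simpa using hj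
            rw [List.getD_eq_getElem?_getD, List.getElem?_map, List.getElem?_eq_getElem hib]
            simp [List.getD_eq_getElem?_getD, List.getElem?_eq_getElem (show j < block[i].length by omega)]
      have hmk : m - 1 = k := by omega
      rw [hcols, ← List.map_reverse, List.filterMap_map, hmk, numsOf, ← List.filterMap_reverse]
      rfl
  rw [hop, hnums, pv_calcA_reverse]

-- ===== VERDICT (by name: the statement is the Claim_ definition above) =====
theorem part2_spec : Claim_equal_part2 := by
  intro blocks _ hpre
  unfold Spec_part2 part2 part2_alt
  apply PySem.List.foldl_congr_mem
  intro acc block hb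
  obtain ⟨h1, h2, _⟩ := hpre block hb
  have hA := pv_A_block block h1 h2
  have hne : block.map List.length ≠ [] := by simpa using h1
  obtain ⟨a, ha⟩ : ∃ a, (block.map List.length).min? = some a := by
    cases h : (block.map List.length).min? with
    | none => exact absurd (List.min?_eq_none_iff.mp h) hne
    | some a => exact ⟨a, rfl⟩
  obtain ⟨hmem, hle⟩ := List.min?_eq_some_iff.mp ha
  have hmlen : ∀ r ∈ block, (block.map List.length).min?.getD 0 ≤ r.length := by
    intro r hr; rw [ha]; exact hle _ (List.mem_map_of_mem hr)
  have hB := pv_B_block block ((block.map List.length).min?.getD 0) rfl hmlen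
  simp only [] at hA hB ⊢
  rw [hA, ← hB]
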